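-- pv_equiv track=rewrite | github.com/FuryCroissant/CodingTheory5 | main.py | binary_list
-- ===== SOURCE A (Python) =====
-- def revers(a):  #переворот списка
--     res = []
--     for i in range(len(a)):
--         res.append(a[len(a) - 1 - i])
--     return res
--
-- def binary_list(m,n):  #формирование списка двоичных представлений
--     res = []
--     for i in range(n):
--         j = bin(i)#число в виде двоичной строки
--         j = [int(x) for x in list(j[2:len(j)])]#считываем после префикса 0b
--         l = len(j)#длина считанного
--         if (l < m):
--             j = [0] * (m - l) + j #массив из m-l нулей  и j на конце
--         res.append(revers(j))#реверс массива и добавление в список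
--     return res
-- ===== SOURCE B (Python) =====
-- def binary_list(m, n):
--     return [[(i >> k) & 1 for k in range(max(m, i.bit_length() or 1))]
--             for i in range(n)]
-- ===== Notes on version B (the rewrite author's own statement) =====
-- stated objective: idiomatic
-- what changed: Replaced bin()-string slicing, char-to-int parsing, zero-prefix padding and a hand-written index-loop list reversal with a single comprehension extracting bits least-significant-first via (i >> k) & 1 over range(max(m, i.bit_length() or 1)).
import Mathlib
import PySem

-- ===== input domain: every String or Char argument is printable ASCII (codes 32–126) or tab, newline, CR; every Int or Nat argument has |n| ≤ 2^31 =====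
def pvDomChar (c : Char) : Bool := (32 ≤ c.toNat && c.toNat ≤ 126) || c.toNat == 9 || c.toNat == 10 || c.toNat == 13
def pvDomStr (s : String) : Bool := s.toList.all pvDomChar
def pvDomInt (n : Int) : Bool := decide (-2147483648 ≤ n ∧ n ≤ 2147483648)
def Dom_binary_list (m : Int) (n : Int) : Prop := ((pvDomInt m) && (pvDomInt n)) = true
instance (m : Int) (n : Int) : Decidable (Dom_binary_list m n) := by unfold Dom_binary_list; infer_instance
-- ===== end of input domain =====

-- B replaces A's bin()-string slicing, zero-padding and hand-written index-loop list reversal by a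
-- direct LSB-first bit-extraction comprehension (idiomatic; no speed claim).

-- ===== PORT A =====
-- digits of bin(i)[2:] as ints (MSB first); exact for the 0 ≤ i the loop produces
def binDigitsAux : Nat → List Int
  | 0 => []
  | k + 1 => binDigitsAux ((k + 1) / 2) ++ [(((k + 1) % 2 : Nat) : Int)]
decreasing_by exact Nat.div_lt_self (Nat.succ_pos k) (by omega)

def binDigits (i : Int) : List Int := if i.toNat = 0 then [0] else binDigitsAux i.toNat

def revers (a : List Int) : List Int :=
  (PySem.List.pyRange 0 (a.length : Int) 1).foldl
    (fun res i => res ++ [PySem.List.pyGetD a ((a.length : Int) - 1 - i) 0]) []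

def binary_list (m : Int) (n : Int) : List (List Int) :=
  (PySem.List.pyRange 0 n 1).foldl
    (fun res i =>
      let j := binDigits i
      let l : Int := j.length
      let j' := if l < m then List.replicate (m - l).toNat (0 : Int) ++ j else j
      res ++ [revers j']) []

-- ===== PORT B =====
-- [[(i >> k) & 1 for k in range(max(m, i.bit_length() or 1))] for i in range(n)]
def binary_list_alt (m : Int) (n : Int) : List (List Int) :=
  (PySem.List.pyRange 0 n 1).map (fun i =>
    let nbits : Int := if PySem.Int.bitLength i = 0 then 1 else (PySem.Int.bitLength i : Int)
    (PySem.List.pyRange 0 (max m nbits) 1).map (fun k => PySem.Int.band (i >>> k.toNat) 1))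

-- ===== PRECONDITION & SPEC =====
def Spec_binary_list (m : Int) (n : Int) (out : List (List Int)) : Prop := out = binary_list_alt m n
instance (m : Int) (n : Int) (out : List (List Int)) : Decidable (Spec_binary_list m n out) := by unfold Spec_binary_list; infer_instance

-- ===== CLAIM (what is proved, stated in full; the proofs are below) =====
def Claim_equal_binary_list : Prop := ∀ (m : Int) (n : Int), Dom_binary_list m n → Spec_binary_list m n (binary_list m n)

-- ===== LEMMAS AND PROOFS =====

theorem revers_eq (x : List Int) : revers x = x.reverse := by
  unfold revers
  rw [PySem.List.foldl_append_singleton_eq_map, PySem.List.pyRange_one]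
  simp only [Int.sub_zero, Int.toNat_natCast, List.nil_append, List.map_map]
  apply List.ext_getElem
  · simp
  · intro k hk1 hk2
    simp only [List.length_map, List.length_range] at hk1
    simp only [List.getElem_map, List.getElem_range, Function.comp_apply, List.getElem_reverse]
    have h : (x.length : Int) - 1 - (0 + (k : Int)) = ((x.length - 1 - k : Nat) : Int) := by omega
    rw [h, PySem.List.pyGetD_natCast, List.getD_eq_getElem _ _ (by omega)]

theorem binDigitsAux_length (a : Nat) :
    (binDigitsAux a).length = PySem.Int.bitLength (a : Int) := by
  fun_induction binDigitsAux a with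
  | case1 => simp
  | case2 k ih =>
      rw [PySem.Int.bitLength_natCast (Nat.succ_pos k)]
      simp [ih]

theorem bitRow_eq_aux (a : Nat) : ∀ L : Nat, (binDigitsAux a).length ≤ L →
    (List.range L).map (fun k => (((a >>> k) % 2 : Nat) : Int)) =
      (binDigitsAux a).reverse ++ List.replicate (L - (binDigitsAux a).length) 0 := by
  fun_induction binDigitsAux a with
  | case1 =>
      intro L _
      simp [Nat.shiftRight_eq_div_pow]
  | case2 k ih =>
      intro L hL
      simp only [List.length_append, List.length_singleton] at hL
      obtain ⟨L', rfl⟩ : ∃ L', L = L' + 1 := ⟨L - 1, by omega⟩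
      rw [List.range_succ_eq_map]
      simp only [List.map_cons, List.map_map]
      have hsh : ∀ k' : Nat, (k + 1) >>> (k' + 1) = ((k + 1) / 2) >>> k' := by
        intro k'
        simp [Nat.shiftRight_eq_div_pow, Nat.pow_succ, Nat.div_div_eq_div_mul, Nat.mul_comm]
      have : (List.range L').map ((fun k_1 => (((k + 1) >>> k_1 % 2 : Nat) : Int)) ∘ (· + 1)) =
          (List.range L').map (fun k' => ((((k + 1) / 2) >>> k' % 2 : Nat) : Int)) := by
        apply List.map_congr_left; intro x _; simp only [Function.comp_apply, hsh x]
      rw [this, ih L' (by omega)]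
      rw [List.reverse_append]
      simp only [List.reverse_singleton, List.singleton_append, List.length_append,
        List.length_singleton, Nat.shiftRight_zero]
      rw [show L' + 1 - ((binDigitsAux ((k + 1) / 2)).length + 1)
            = L' - (binDigitsAux ((k + 1) / 2)).length from by omega]
      simp

theorem band_bit (a k : Nat) : PySem.Int.band ((a:Int) >>> k) 1 = (((a >>> k) % 2 : Nat) : Int) := by
  rw [← Int.natCast_shiftRight, PySem.Int.band_one,
    show (2:Int) = ((2:Nat):Int) from rfl, PySem.Int.mod_natCast]

theorem bitRow_eq (a : Nat) (L : Nat) (h : (binDigits (a:Int)).length ≤ L) :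
    (List.range L).map (fun k => (((a >>> k) % 2 : Nat) : Int)) =
      (binDigits (a:Int)).reverse ++ List.replicate (L - (binDigits (a:Int)).length) 0 := by
  rcases Nat.eq_zero_or_pos a with h0 | hpos
  · subst h0
    simp only [binDigits, Nat.cast_zero, Int.toNat_zero, reduceIte, List.length_singleton] at h ⊢
    have h1 : (List.range L).map (fun k => (((0 >>> k) % 2 : Nat) : Int)) = List.replicate L (0:Int) := by
      refine List.eq_replicate_iff.mpr ⟨by simp, ?_⟩
      intro b hb
      simp only [List.mem_map] at hb
      obtain ⟨x, -, rfl⟩ := hb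
      simp
    rw [h1, List.reverse_singleton,
      show ([(0:Int)]) = List.replicate 1 (0:Int) from List.replicate_one.symm,
      List.replicate_append_replicate]
    congr 1; omega
  · have hbd : binDigits (a:Int) = binDigitsAux a := by
      simp [binDigits, Int.toNat_natCast]; omega
    rw [hbd] at h ⊢
    exact bitRow_eq_aux a L h

theorem binDigits_length_pos (a : Nat) : 1 ≤ (binDigits (a:Int)).length := by
  rcases Nat.eq_zero_or_pos a with h0 | hpos
  · subst h0; simp [binDigits]
  · have hbd : binDigits (a:Int) = binDigitsAux a := by
      simp [binDigits, Int.toNat_natCast]; omega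
    rw [hbd, binDigitsAux_length, PySem.Int.bitLength_natCast hpos]; omega

theorem binDigits_length_eq (a : Nat) :
    ((binDigits (a:Int)).length : Int) =
      (if PySem.Int.bitLength (a:Int) = 0 then 1 else (PySem.Int.bitLength (a:Int) : Int)) := by
  rcases Nat.eq_zero_or_pos a with h0 | hpos
  · subst h0; simp [binDigits]
  · have hbd : binDigits (a:Int) = binDigitsAux a := by
      simp [binDigits, Int.toNat_natCast]; omega
    have : PySem.Int.bitLength (a:Int) ≠ 0 := by
      rw [PySem.Int.bitLength_natCast hpos]; omega
    rw [hbd, binDigitsAux_length, if_neg this]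

theorem row_eq (m : Int) (a : Nat) :
    List.reverse (if ((binDigits (a : Int)).length : Int) < m
            then List.replicate (m - ((binDigits (a : Int)).length : Int)).toNat (0 : Int) ++ binDigits (a : Int)
            else binDigits (a : Int)) =
    (PySem.List.pyRange 0
        (max m (if PySem.Int.bitLength (a : Int) = 0 then 1 else (PySem.Int.bitLength (a : Int) : Int))) 1).map
      (fun k => PySem.Int.band ((a : Int) >>> k.toNat) 1) := by
  rw [PySem.List.pyRange_one, List.map_map, Int.sub_zero, ← binDigits_length_eq]
  have hmap : ∀ LN : Nat, (List.range LN).map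
      ((fun k => PySem.Int.band ((a : Int) >>> k.toNat) 1) ∘ (fun k : Nat => 0 + (k : Int))) =
      (List.range LN).map (fun k => (((a >>> k) % 2 : Nat) : Int)) := by
    intro LN
    apply List.map_congr_left; intro x _
    simp only [Function.comp_apply, Int.zero_add, Int.toNat_natCast]
    rw [Int.shiftRight_natCast]
    exact band_bit a x
  rw [hmap]
  have h1 : 1 ≤ (binDigits (a:Int)).length := binDigits_length_pos a
  by_cases hm : (((binDigits (a:Int)).length : Int) < m)
  · rw [if_pos hm]
    have hmax : max m ((binDigits (a:Int)).length : Int) = m := by omega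
    rw [hmax, bitRow_eq a m.toNat (by omega), List.reverse_append, List.reverse_replicate]
    congr 2
    omega
  · rw [if_neg hm]
    have hmax : max m ((binDigits (a:Int)).length : Int) = ((binDigits (a:Int)).length : Int) := by omega
    rw [hmax, bitRow_eq a ((binDigits (a:Int)).length : Int).toNat (by omega)]
    simp

-- ===== VERDICT (by name: the statement is the Claim_ definition above) =====
theorem binary_list_spec : Claim_equal_binary_list := by
  intro m n _
  unfold Spec_binary_list binary_list binary_list_alt
  rw [PySem.List.foldl_append_singleton_eq_map]
  refine List.map_congr_left ?_
  intro i hi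
  have h0 : 0 ≤ i := (PySem.List.mem_pyRange_one.mp hi).1
  obtain ⟨a, rfl⟩ : ∃ a : Nat, i = (a : Int) := ⟨i.toNat, (Int.toNat_of_nonneg h0).symm⟩
  simpa [revers_eq] using row_eq m a
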